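-- pv_equiv track=rewrite | github.com/zhaolijian/suanfa | guanglianda_0722/1.py | func
-- ===== SOURCE A (Python) =====
-- import collections
--
-- def func(n, array):
--     d = collections.Counter(array)
--     temp = []
--     for key in d.keys():
--         if d[key] >= 2:
--             temp.append(key)
--     temp.sort()
--     if not temp:
--         return -1
--     elif d[temp[-1]] >= 4:
--         return temp[-1] * temp[-1]
--     elif len(temp) < 2:
--         return -1
--     return temp[-1] * temp[-2]
-- ===== SOURCE B (Python) =====
-- import collections
--
-- def func(n, array):
--     d = collections.Counter(array)
--     dups = [k for k, c in d.items() if c >= 2]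
--     if not dups:
--         return -1
--     m1 = max(dups)
--     if d[m1] >= 4:
--         return m1 * m1
--     dups.remove(m1)
--     if not dups:
--         return -1
--     return m1 * max(dups)
-- ===== Notes on version B (the rewrite author's own statement) =====
-- stated objective: simpler
-- what changed: B drops A's collect-then-sort-then-index-from-the-back: it takes the max of the duplicated keys and, if needed, the max of the rest, so no sorting is performed.
import Mathlib
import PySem

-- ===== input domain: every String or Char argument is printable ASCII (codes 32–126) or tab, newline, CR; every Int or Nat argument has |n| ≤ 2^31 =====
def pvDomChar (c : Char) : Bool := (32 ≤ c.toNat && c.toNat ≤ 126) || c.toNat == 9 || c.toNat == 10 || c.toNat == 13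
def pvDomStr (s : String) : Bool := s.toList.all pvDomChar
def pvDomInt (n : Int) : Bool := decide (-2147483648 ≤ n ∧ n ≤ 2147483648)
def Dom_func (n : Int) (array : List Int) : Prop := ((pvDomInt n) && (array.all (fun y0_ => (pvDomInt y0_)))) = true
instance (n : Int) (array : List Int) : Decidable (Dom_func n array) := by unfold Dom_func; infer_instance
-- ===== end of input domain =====

-- B replaces A's "collect duplicated keys, sort, index from the back" by "max of the
-- duplicated keys, then max of the rest" — no sort; objective: simpler.

-- ===== PORT A =====
def func (n : Int) (array : List Int) : Int :=
  let d := PySem.Dict.counter array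
  let temp := d.keys.foldl (fun acc key => if d.getD key 0 ≥ 2 then acc ++ [key] else acc) []
  let temp := PySem.List.sorted temp (fun x => x) false
  if temp = [] then -1
  else if d.getD (PySem.List.pyGetD temp (-1) 0) 0 ≥ 4 then
    PySem.List.pyGetD temp (-1) 0 * PySem.List.pyGetD temp (-1) 0
  else if (temp.length : Int) < 2 then -1
  else PySem.List.pyGetD temp (-1) 0 * PySem.List.pyGetD temp (-2) 0

-- ===== PORT B =====
def func_alt (n : Int) (array : List Int) : Int :=
  let d := PySem.Dict.counter array
  let dups := (d.items.filter (fun p => p.2 ≥ 2)).map (·.1)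
  if dups = [] then -1
  else
    match PySem.List.max? dups (fun x => x) with
    | none => -1  -- unreachable: dups ≠ []
    | some m1 =>
      if d.getD m1 0 ≥ 4 then m1 * m1
      else
        match PySem.List.remove? dups m1 with
        | none => -1  -- unreachable: m1 ∈ dups
        | some rest =>
          if rest = [] then -1
          else
            match PySem.List.max? rest (fun x => x) with
            | none => -1  -- unreachable: rest ≠ []
            | some m2 => m1 * m2

-- ===== PRECONDITION & SPEC =====
def Spec_func (n : Int) (array : List Int) (out : Int) : Prop := out = func_alt n array
instance (n : Int) (array : List Int) (out : Int) : Decidable (Spec_func n array out) := by unfold Spec_func; infer_instance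

-- ===== CLAIM (what is proved, stated in full; the proofs are below) =====
def Claim_equal_func : Prop := ∀ (n : Int) (array : List Int), Dom_func n array → Spec_func n array (func n array)

-- ===== LEMMAS AND PROOFS =====

-- in a ≤-sorted list every element is ≤ the last one
theorem pv_le_getLast {s : List Int} (hs : s.Pairwise (· ≤ ·)) (hne : s ≠ []) :
    ∀ y ∈ s, y ≤ s.getLast hne := by
  induction s with
  | nil => simp at hne
  | cons a t ih =>
    intro y hy
    rcases List.mem_cons.mp hy with rfl | hyt
    · cases t with
      | nil => simp [List.getLast]
      | cons b u =>
        have : y ≤ (b :: u).getLast (by simp) :=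
          (List.pairwise_cons.mp hs).1 _ (List.getLast_mem _)
        simpa [List.getLast] using this
    · cases t with
      | nil => simp at hyt
      | cons b u =>
        have := ih (List.pairwise_cons.mp hs).2 (by simp) y hyt
        simpa [List.getLast] using this

-- the Python max of l equals the last element of any ≤-sorted rearrangement of l
theorem pv_max_eq_getLast {l s : List Int} (hp : s.Perm l) (hs : s.Pairwise (· ≤ ·))
    (hne : s ≠ []) {m : Int} (hm : PySem.List.max? l (fun x => x) = some m) :
    m = s.getLast hne := by
  have hmem : m ∈ s := hp.mem_iff.mpr (PySem.List.max?_mem hm)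
  have h1 : m ≤ s.getLast hne := pv_le_getLast hs hne m hmem
  have h2 : s.getLast hne ≤ m :=
    PySem.List.max?_isMax hm _ (hp.mem_iff.mp (List.getLast_mem hne))
  omega

-- the heart of the equivalence: on any Nodup list l of candidate keys,
-- A's sort-and-index-from-the-back equals B's two max passes
theorem pv_main (d : PySem.Dict Int Int) (l : List Int) (hnd : l.Nodup) :
    (let s := PySem.List.sorted l (fun x => x) false
     if s = [] then (-1 : Int)
     else if d.getD (PySem.List.pyGetD s (-1) 0) 0 ≥ 4 then
       PySem.List.pyGetD s (-1) 0 * PySem.List.pyGetD s (-1) 0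
     else if (s.length : Int) < 2 then -1
     else PySem.List.pyGetD s (-1) 0 * PySem.List.pyGetD s (-2) 0)
    =
    (if l = [] then (-1 : Int)
     else
       match PySem.List.max? l (fun x => x) with
       | none => -1
       | some m1 =>
         if d.getD m1 0 ≥ 4 then m1 * m1
         else
           match PySem.List.remove? l m1 with
           | none => -1
           | some rest =>
             if rest = [] then -1
             else
               match PySem.List.max? rest (fun x => x) with
               | none => -1
               | some m2 => m1 * m2) := by
  set s := PySem.List.sorted l (fun x => x) false with hsdef
  have hperm : s.Perm l := PySem.List.sorted_perm l _ _
  have hsort : s.Pairwise (· ≤ ·) := by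
    simpa using PySem.List.sorted_pairwise l (fun x => x)
  by_cases hnil : l = []
  · simp [hnil, hsdef, PySem.List.sorted_eq_nil_iff]
  · have hsne : s ≠ [] := fun h => hnil (List.Perm.nil_eq (h ▸ hperm)).symm
    rw [if_neg hsne, if_neg hnil]
    obtain ⟨m1, hm1⟩ : ∃ m1, PySem.List.max? l (fun x => x) = some m1 := by
      cases h : PySem.List.max? l (fun x => x) with
      | none => exact absurd ((PySem.List.max?_eq_none_iff _ _).mp h) hnil
      | some m => exact ⟨m, rfl⟩
    simp only [hm1]
    have hlast : PySem.List.pyGetD s (-1) 0 = s.getLast hsne :=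
      PySem.List.pyGetD_neg_one s 0 hsne
    have hm1last : m1 = s.getLast hsne := pv_max_eq_getLast hperm hsort hsne hm1
    rw [hlast, ← hm1last]
    by_cases h4 : d.getD m1 0 ≥ 4
    · rw [if_pos h4, if_pos h4]
    · rw [if_neg h4, if_neg h4]
      have hm1mem : m1 ∈ l := PySem.List.max?_mem hm1
      have hrem : PySem.List.remove? l m1 = some (l.erase m1) :=
        PySem.List.remove?_eq_some_erase l m1 hm1mem
      simp only [hrem]
      have hlen : s.length = l.length := hperm.length_eq
      have hslast : s = s.dropLast ++ [s.getLast hsne] := by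
        simpa using (List.dropLast_append_getLast hsne).symm
      have hsnd : s.Nodup := hperm.nodup_iff.mpr hnd
      have hnotmem : s.getLast hsne ∉ s.dropLast := by
        intro hmem
        have := hslast ▸ hsnd
        exact (List.nodup_append.mp this).2.2 _ hmem _ (List.mem_singleton_self _) rfl
      have hperm2 : s.dropLast.Perm (l.erase m1) := by
        have h1 : (s.erase m1).Perm (l.erase m1) := hperm.erase m1
        have h2 : s.erase m1 = s.dropLast := by
          conv_lhs => rw [hslast, hm1last]
          rw [List.erase_append_right _ hnotmem]
          simp
        rwa [h2] at h1
      have hsort2 : s.dropLast.Pairwise (· ≤ ·) :=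
        List.Pairwise.sublist (List.dropLast_sublist s) hsort
      by_cases hone : l.erase m1 = []
      · have hL1 : l.length = 1 := by
          have he := List.length_erase_of_mem hm1mem
          have h0 : (l.erase m1).length = 0 := by simp [hone]
          have hp : 0 < l.length := List.length_pos_of_mem hm1mem
          omega
        have hl2 : (s.length : Int) < 2 := by
          rw [hlen, hL1]; norm_num
        rw [if_pos hl2, if_pos hone]
      · have hdne : s.dropLast ≠ [] := by
          intro h
          exact hone (List.Perm.nil_eq (h ▸ hperm2)).symm
        have hlen2 : 2 ≤ s.length := by
          have h1 : s.dropLast.length = s.length - 1 := List.length_dropLast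
          have h0 : 0 < s.dropLast.length := List.length_pos_iff.mpr hdne
          omega
        have hl2 : ¬ ((s.length : Int) < 2) := by omega
        rw [if_neg hl2, if_neg hone]
        obtain ⟨m2, hm2⟩ : ∃ m2, PySem.List.max? (l.erase m1) (fun x => x) = some m2 := by
          cases h : PySem.List.max? (l.erase m1) (fun x => x) with
          | none => exact absurd ((PySem.List.max?_eq_none_iff _ _).mp h) hone
          | some m => exact ⟨m, rfl⟩
        simp only [hm2]
        have hm2last : m2 = s.dropLast.getLast hdne :=
          pv_max_eq_getLast hperm2 hsort2 hdne hm2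
        have hidx : PySem.List.pyGetD s (-2) 0 = s[s.length - 2] := by
          rw [PySem.List.pyGetD_neg_ofNat s 2 0 (by omega) (by omega)]
        have hdl : s.dropLast.getLast hdne = s[s.length - 2] := by
          rw [List.getLast_eq_getElem, List.getElem_dropLast]
          congr 1
          have h1 : s.dropLast.length = s.length - 1 := List.length_dropLast
          omega
        rw [hidx, ← hdl, ← hm2last]

theorem func_eq_alt (n : Int) (array : List Int) : func n array = func_alt n array := by
  unfold func func_alt
  simp only []
  set d := PySem.Dict.counter array with hd
  have hA : d.keys.foldl (fun acc key => if d.getD key 0 ≥ 2 then acc ++ [key] else acc) []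
      = d.keys.filter (fun key => decide (d.getD key 0 ≥ 2)) := by
    simpa using PySem.List.foldl_append_ite_eq_filter (fun key => d.getD key 0 ≥ 2) d.keys []
  have hB : (d.items.filter (fun p => p.2 ≥ 2)).map (·.1)
      = d.keys.filter (fun key => decide (d.getD key 0 ≥ 2)) := by
    rw [hd, PySem.Dict.items_counter, PySem.Dict.keys_counter,
      List.filter_map, List.map_map]
    refine Eq.trans ?_ (List.map_id _)
    refine congrArg₂ _ rfl (List.filter_congr ?_)
    intro k hk
    simp [Function.comp, PySem.Dict.getD_counter]
  rw [hA, hB]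
  refine pv_main d _ ?_
  rw [hd, PySem.Dict.keys_counter]
  exact (PySem.Set.nodup_ofList array).filter _
-- ===== VERDICT (by name: the statement is the Claim_ definition above) =====
theorem func_spec : Claim_equal_func := by
  intro n array _
  unfold Spec_func
  exact func_eq_alt n array
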